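-- pv_equiv track=rewrite | github.com/pypi-data/pypi-mirror-297 | packages/areal-common-services/areal_common_services-1.0.1.tar.gz/areal_common_services-1.0.1/src/common_services/services/description_sorting.py | merge_close_distances
-- ===== SOURCE A (Python) =====
-- from collections import defaultdict
--
-- def merge_close_distances(dictionary, distance=5):
--     result_dict = defaultdict(list)
--     sorted_keys = list(dictionary.keys())
--     current_key = None
--     current_values = []
--     current_keys = []
--     for key in sorted_keys:
--         if current_key is None:
--             current_key = key
--             current_values = dictionary[key]
--             current_keys.append(key)
--         elif abs(key - current_key) < distance:
--             current_values.extend(dictionary[key])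
--             current_keys.append(key)
--         else:
--             current_values = sorted(current_values, key=lambda x: x[0])
--             mean_key = int(sum(current_keys) / len(current_keys))
--             result_dict[mean_key] = current_values
--             current_key = key
--             current_values = dictionary[key]
--             current_keys = [current_key]
--
--     # Add the last set of values
--     if current_key is not None:
--         current_values = sorted(current_values, key=lambda x: x[0])
--         mean_key = int(sum(current_keys) / len(current_keys))
--         result_dict[mean_key] = current_values
--         result_dict[mean_key] = current_values
--
--     return result_dict
-- ===== SOURCE B (Python) =====
-- from collections import defaultdict
--
-- def merge_close_distances(dictionary, distance=5):
--     # Pass 1: group the keys (a new group starts when a key is >= `distance`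
--     # away from the first key of the current group).
--     groups = []
--     for k in dictionary.keys():
--         if groups and abs(k - groups[-1][0]) < distance:
--             groups[-1].append(k)
--         else:
--             groups.append([k])
--     # Pass 2: merge each group's value lists under the truncated-mean key.
--     result = defaultdict(list)
--     for g in groups:
--         acc = dictionary[g[0]]  # same list object as A extends in place
--         for k in g[1:]:
--             acc.extend(dictionary[k])
--         result[int(sum(g) / len(g))] = sorted(acc, key=lambda x: x[0])
--     return result
-- ===== Notes on version B (the rewrite author's own statement) =====
-- stated objective: simpler
-- what changed: B splits A's single stateful loop (None sentinel, duplicated flush code in the loop body and after it) into two plain passes: first group the keys, then emit one result entry per group.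
import Mathlib
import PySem

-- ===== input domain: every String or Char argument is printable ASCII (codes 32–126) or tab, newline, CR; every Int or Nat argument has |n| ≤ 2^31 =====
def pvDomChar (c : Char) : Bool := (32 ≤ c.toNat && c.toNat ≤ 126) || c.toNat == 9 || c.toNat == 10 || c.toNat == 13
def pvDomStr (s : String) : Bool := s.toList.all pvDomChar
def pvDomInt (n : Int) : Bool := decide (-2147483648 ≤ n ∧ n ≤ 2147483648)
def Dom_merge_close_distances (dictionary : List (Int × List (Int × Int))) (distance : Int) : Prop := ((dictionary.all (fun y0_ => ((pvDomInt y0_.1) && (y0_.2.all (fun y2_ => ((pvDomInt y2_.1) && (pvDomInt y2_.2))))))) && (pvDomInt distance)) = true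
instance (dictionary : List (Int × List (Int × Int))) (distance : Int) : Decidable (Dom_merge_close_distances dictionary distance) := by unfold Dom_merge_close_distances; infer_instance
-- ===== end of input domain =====

-- B replaces A's single stateful loop (None sentinel, duplicated flush code) by two plain
-- passes: group the keys, then emit one entry per group; same return value. Note: both
-- Pythons extend dictionary[first key of each group] in place; the theorems are about the
-- return value (which is unaffected by that mutation).

-- shared helpers: dictionary[k] (keys come from the dict itself, so the lookup always hits;
-- first match = the dict convention), sorted(vs, key=lambda x: x[0]),
-- and int(sum(ks)/len(ks)) — Python truncates the float quotient toward zero, which is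
-- Int.tdiv of the exact quotient (exact while |sum| stays below 2^53).
def pvLookup (dictionary : List (Int × List (Int × Int))) (k : Int) : List (Int × Int) :=
  ((dictionary.find? (fun p => p.1 == k)).map Prod.snd).getD []

def pvSortVals (vs : List (Int × Int)) : List (Int × Int) :=
  PySem.List.sorted vs (fun x => x.1) false

def pvMean (ks : List Int) : Int := ks.sum.tdiv (ks.length : Int)

-- ===== PORT A =====
-- loop state: (result_dict, current_key, current_values, current_keys)
def mcdStep (dictionary : List (Int × List (Int × Int))) (distance : Int)
    (st : PySem.Dict Int (List (Int × Int)) × Option Int × List (Int × Int) × List Int)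
    (key : Int) :
    PySem.Dict Int (List (Int × Int)) × Option Int × List (Int × Int) × List Int :=
  match st with
  | (res, none, _cv, ck) =>
      (res, some key, pvLookup dictionary key, ck ++ [key])
  | (res, some c, cv, ck) =>
      if |key - c| < distance then
        (res, some c, cv ++ pvLookup dictionary key, ck ++ [key])
      else
        (res.insert (pvMean ck) (pvSortVals cv), some key, pvLookup dictionary key, [key])

def merge_close_distances (dictionary : List (Int × List (Int × Int))) (distance : Int) : List (Int × List (Int × Int)) :=
  let st := (dictionary.map Prod.fst).foldl (mcdStep dictionary distance)
      ((PySem.Dict.empty : PySem.Dict Int (List (Int × Int))), none, [], [])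
  match st with
  | (res, none, _, _) => res.items
  | (res, some _, cv, ck) =>
      -- the Python assigns result_dict[mean_key] twice; ported literally
      (((res.insert (pvMean ck) (pvSortVals cv)).insert (pvMean ck) (pvSortVals cv))).items

-- ===== PORT B =====
-- pass 1 step: append k to the last group, or start a new group
def mcdAddKey (distance : Int) (gs : List (List Int)) (k : Int) : List (List Int) :=
  match gs.getLast? with
  | some g => if |k - g.headD 0| < distance then gs.dropLast ++ [g ++ [k]] else gs ++ [[k]]
  | none => gs ++ [[k]]

-- pass 2 step: merge one group's value lists (groups are never empty)
def mcdGroupOut (dictionary : List (Int × List (Int × Int)))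
    (res : PySem.Dict Int (List (Int × Int))) (g : List Int) :
    PySem.Dict Int (List (Int × Int)) :=
  match g with
  | [] => res
  | k0 :: rest =>
      let acc := rest.foldl (fun a k => a ++ pvLookup dictionary k) (pvLookup dictionary k0)
      res.insert (pvMean g) (pvSortVals acc)

def merge_close_distances_alt (dictionary : List (Int × List (Int × Int))) (distance : Int) : List (Int × List (Int × Int)) :=
  let groups := (dictionary.map Prod.fst).foldl (mcdAddKey distance) []
  (groups.foldl (mcdGroupOut dictionary)
      ((PySem.Dict.empty : PySem.Dict Int (List (Int × Int))))).items

-- ===== PRECONDITION & SPEC =====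
def Spec_merge_close_distances (dictionary : List (Int × List (Int × Int))) (distance : Int) (out : List (Int × List (Int × Int))) : Prop := out = merge_close_distances_alt dictionary distance
instance (dictionary : List (Int × List (Int × Int))) (distance : Int) (out : List (Int × List (Int × Int))) : Decidable (Spec_merge_close_distances dictionary distance out) := by unfold Spec_merge_close_distances; infer_instance

-- ===== CLAIM (what is proved, stated in full; the proofs are below) =====
def Claim_equal_merge_close_distances : Prop := ∀ (dictionary : List (Int × List (Int × Int))) (distance : Int), Dom_merge_close_distances dictionary distance → Spec_merge_close_distances dictionary distance (merge_close_distances dictionary distance)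

-- ===== LEMMAS AND PROOFS =====

theorem mcdGroupOut_eq (d : List (Int × List (Int × Int)))
    (res : PySem.Dict Int (List (Int × Int))) (g : List Int) (hg : g ≠ []) :
    mcdGroupOut d res g = res.insert (pvMean g) (pvSortVals (g.flatMap (pvLookup d))) := by
  cases g with
  | nil => exact absurd rfl hg
  | cons k0 rest =>
      simp only [mcdGroupOut, PySem.List.foldl_append_eq_flatMap, List.flatMap_cons]

-- the loop invariant: after a nonempty key prefix, A's state is
-- (B's result over all closed groups, head of the open group, its merged values, the group)
theorem mcd_inv (d : List (Int × List (Int × Int))) (dist : Int) :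
    ∀ ks : List Int, ks ≠ [] →
      ∃ gs g, ks.foldl (mcdAddKey dist) [] = gs ++ [g] ∧ g ≠ [] ∧
        ks.foldl (mcdStep d dist)
            ((PySem.Dict.empty : PySem.Dict Int (List (Int × Int))), none, [], []) =
          (gs.foldl (mcdGroupOut d) PySem.Dict.empty,
            some (g.headD 0), g.flatMap (pvLookup d), g) := by
  intro ks
  induction ks using List.reverseRecOn with
  | nil => intro h; exact absurd rfl h
  | append_singleton ks k ih =>
      intro _
      rcases eq_or_ne ks [] with hks | hne
      · subst hks
        refine ⟨[], [k], ?_, by simp, ?_⟩ <;>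
          simp [mcdAddKey, mcdStep]
      · obtain ⟨gs, g, hgrp, hgne, hst⟩ := ih hne
        cases g with
        | nil => exact absurd rfl hgne
        | cons a t' =>
          rw [List.foldl_append, List.foldl_append, hgrp, hst]
          simp only [List.foldl_cons, List.foldl_nil]
          have hlast : (gs ++ [a :: t']).getLast? = some (a :: t') := by simp
          by_cases hc : |k - a| < dist
          · refine ⟨gs, (a :: t') ++ [k], ?_, by simp, ?_⟩
            · simp [mcdAddKey, hlast, hc]
            · simp [mcdStep, hc]
          · refine ⟨gs ++ [a :: t'], [k], ?_, by simp, ?_⟩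
            · simp [mcdAddKey, hlast, hc]
            · simp only [mcdStep, List.headD_cons, if_neg hc]
              rw [List.foldl_append]
              simp only [List.foldl_cons, List.foldl_nil]
              rw [mcdGroupOut_eq d _ (a :: t') (by simp)]
              simp [pvLookup]

-- ===== VERDICT (by name: the statement is the Claim_ definition above) =====
theorem merge_close_distances_spec : Claim_equal_merge_close_distances := by
  intro dictionary distance _
  unfold Spec_merge_close_distances merge_close_distances merge_close_distances_alt
  rcases eq_or_ne (dictionary.map Prod.fst) [] with hks | hks
  · rw [hks]; simp
  · obtain ⟨gs, g, hgrp, hgne, hst⟩ :=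
      mcd_inv dictionary distance (dictionary.map Prod.fst) hks
    simp only [hst, hgrp, List.foldl_append, List.foldl_cons, List.foldl_nil]
    rw [mcdGroupOut_eq dictionary _ g hgne, PySem.Dict.insert_insert_self]
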